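-- pv_equiv track=rewrite | github.com/nnnangni/algorithm | hidenseek.py | bfs
-- ===== SOURCE A (Python) =====
-- def bfs(x,k):
--     q=[]
--     visited = [0]*(100001)
--     q.append(x)
--     visited[x] = 1
--     while len(q) != 0:
--         x = q.pop(0)
--         if x==k:
--             return visited[k]-1
--         # x-1 인접
--         if x-1>=0 and visited[x-1]==0:
--             q.append(x-1)
--             visited[x-1] = visited[x]+1
-- ===== SOURCE B (Python) =====
-- def bfs(x, k):
--     if x == k:
--         return 0
--     if 0 <= k < x:
--         return x - k
--     return None
-- ===== Notes on version B (the rewrite author's own statement) =====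
-- stated objective: faster
-- what changed: Replaced the BFS over a 100001-slot visited array with the closed form: since the only move is x -> x-1, the answer is 0 when x==k, x-k when 0<=k<x, and None otherwise.
import Mathlib
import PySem

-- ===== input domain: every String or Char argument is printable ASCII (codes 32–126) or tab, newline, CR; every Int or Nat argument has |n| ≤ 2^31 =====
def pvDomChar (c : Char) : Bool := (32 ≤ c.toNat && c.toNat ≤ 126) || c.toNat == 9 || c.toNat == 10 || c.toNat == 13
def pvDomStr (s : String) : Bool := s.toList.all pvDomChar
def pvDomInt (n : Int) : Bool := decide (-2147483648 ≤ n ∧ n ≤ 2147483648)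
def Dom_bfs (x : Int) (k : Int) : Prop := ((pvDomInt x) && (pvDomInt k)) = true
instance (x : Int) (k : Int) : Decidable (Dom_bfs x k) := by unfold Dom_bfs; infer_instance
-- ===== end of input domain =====

-- B replaces A's queue-based BFS over a 100001-slot visited list (only move: x -> x-1) by the
-- closed form 0 / x-k / None (objective: faster, O(1) vs O(x)).

-- ===== PORT A =====
-- Python list index into `visited` (len 100001), with Python's negative-index wraparound;
-- none = IndexError
def vidx (i : Int) : Option Nat :=
  if 0 ≤ i ∧ i < 100001 then some i.toNat
  else if -100001 ≤ i ∧ i < 0 then some (i + 100001).toNat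
  else none

-- visited[i] (read); none = IndexError
def vget (V : Array Int) (i : Int) : Option Int :=
  (vidx i).map (fun j => V[j]?.getD 0)

-- visited[i] = a (write); the out-of-range case (identity) is unreachable: only the initial
-- write in `bfs` can be out of range in the Python, and `bfs` checks it via vidx
def vset (V : Array Int) (i : Int) (a : Int) : Array Int :=
  ((vidx i).map (fun j => V.setIfInBounds j a)).getD V

-- the `while len(q) != 0:` loop; fuel is a totality guard only (300000 exceeds any possible
-- iteration count: the queue holds at most one element and it strictly decreases from at most
-- 100000 to at least 0). Option.map / Option.bind propagate the none of an IndexError exactly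
-- as Python propagates the exception.
def bfsLoop : Nat → List Int → Array Int → Int → Option Int
  | 0, _, _, _ => none
  | fuel+1, q, visited, k =>
    match q with
    | [] => none                                     -- len(q) == 0: fall off, return None
    | x :: rest =>                                   -- x = q.pop(0)
      if x = k then
        (vget visited k).map (fun vk => vk - 1)      -- return visited[k]-1
      else if 0 ≤ x - 1 then                         -- x-1>=0 and (short-circuit) visited[x-1]==0
        (vget visited (x - 1)).bind (fun v1 =>
          if v1 = 0 then
            (vget visited x).bind (fun vx =>         -- visited[x-1] = visited[x]+1
              bfsLoop fuel (rest ++ [x - 1]) (vset visited (x - 1) (vx + 1)) k)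
          else bfsLoop fuel rest visited k)
      else bfsLoop fuel rest visited k

def bfs (x : Int) (k : Int) : Option Int :=
  (vidx x).bind (fun j =>                            -- visited[x] = 1: raises (none) iff x is out of range
    bfsLoop 300000 [x] ((Array.replicate 100001 (0 : Int)).setIfInBounds j 1) k)

-- ===== PORT B =====
def bfs_alt (x : Int) (k : Int) : Option Int :=
  if x = k then some 0
  else if 0 ≤ k ∧ k < x then some (x - k)
  else none

-- ===== PRECONDITION & SPEC =====
-- Pre_ excludes exactly the inputs where A raises IndexError on `visited[x] = 1` (x outside the
-- index range of a 100001-element list, negative indices wrapping around Python-style).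
def Pre_bfs (x : Int) (k : Int) : Prop := -100001 ≤ x ∧ x ≤ 100000
instance (x : Int) (k : Int) : Decidable (Pre_bfs x k) := by unfold Pre_bfs; infer_instance
def pvWitness_bfs : Int × Int := (7, 3)

def Spec_bfs (x : Int) (k : Int) (out : Option Int) : Prop := out = bfs_alt x k
instance (x : Int) (k : Int) (out : Option Int) : Decidable (Spec_bfs x k out) := by unfold Spec_bfs; infer_instance

-- ===== CLAIM (what is proved, stated in full; the proofs are below) =====
def Claim_equal_bfs : Prop := ∀ (x : Int) (k : Int), Dom_bfs x k → Pre_bfs x k → Spec_bfs x k (bfs x k)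

-- ===== LEMMAS AND PROOFS =====

-- one-step unfolding of bfsLoop on a singleton queue (by rfl; the auto-generated equation
-- lemmas are avoided deliberately: they make kernel replay blow up on the 100001 literals)
lemma bfsLoop_one (f : Nat) (x : Int) (V : Array Int) (k : Int) :
    bfsLoop (f + 1) [x] V k =
      (if x = k then
        (vget V k).map (fun vk => vk - 1)
      else if 0 ≤ x - 1 then
        (vget V (x - 1)).bind (fun v1 =>
          if v1 = 0 then
            (vget V x).bind (fun vx =>
              bfsLoop f [x - 1] (vset V (x - 1) (vx + 1)) k)
          else bfsLoop f [] V k)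
      else bfsLoop f [] V k) := rfl

lemma bfsLoop_nil (f : Nat) (V : Array Int) (k : Int) : bfsLoop (f + 1) [] V k = none := rfl

lemma vidx_ofNat (n : Nat) (h : n ≤ 100000) : vidx (n : Int) = some n := by
  simp [vidx]
  omega

lemma vget_ofNat (V : Array Int) (n : Nat) (h : n ≤ 100000) :
    vget V (n : Int) = some (V[n]?.getD 0) := by
  unfold vget
  rw [vidx_ofNat n h, Option.map_some]

lemma vset_ofNat (V : Array Int) (n : Nat) (a : Int) (h : n ≤ 100000) :
    vset V (n : Int) a = V.setIfInBounds n a := by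
  unfold vset
  rw [vidx_ofNat n h, Option.map_some, Option.getD_some]

-- invariant of the loop when the single queue element is a nonnegative index n,
-- visited[n] = c and visited[j] = 0 for all j < n
lemma loop_main (n : Nat) : ∀ (fuel : Nat) (V : Array Int) (c k : Int),
    n ≤ 100000 → n + 2 ≤ fuel → V.size = 100001 →
    V[n]?.getD 0 = c → (∀ j : Nat, j < n → V[j]?.getD 0 = 0) →
    bfsLoop fuel [(n : Int)] V k =
      (if k = (n : Int) then some (c - 1)
       else if 0 ≤ k ∧ k < (n : Int) then some (c + ((n : Int) - k) - 1)
       else none) := by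
  induction n with
  | zero =>
    intro fuel V c k _ hfuel _ hc _
    obtain ⟨f, rfl⟩ : ∃ f, fuel = f + 2 := ⟨fuel - 2, by omega⟩
    rw [bfsLoop_one]
    by_cases hk : k = ((0 : Nat) : Int)
    · rw [if_pos hk.symm, hk, vget_ofNat V 0 (by omega), Option.map_some, if_pos rfl]
      rw [hc]
    · rw [if_neg (fun h => hk h.symm),
        if_neg (show ¬ ((0 : Int) ≤ ((0 : Nat) : Int) - 1) by omega),
        bfsLoop_nil, if_neg hk,
        if_neg (show ¬ (0 ≤ k ∧ k < ((0 : Nat) : Int)) by omega)]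

  | succ m ih =>
    intro fuel V c k hle hfuel hsz hc h0
    obtain ⟨f, rfl⟩ : ∃ f, fuel = f + 1 := ⟨fuel - 1, by omega⟩
    rw [bfsLoop_one]
    by_cases hk : k = ((m + 1 : Nat) : Int)
    · rw [if_pos hk.symm, hk, vget_ofNat V (m + 1) hle, Option.map_some, if_pos rfl]
      rw [hc]
    · have hmle : m ≤ 100000 := by omega
      have hcast : ((m + 1 : Nat) : Int) - 1 = ((m : Nat) : Int) := by push_cast; ring
      rw [if_neg (fun h => hk h.symm), if_pos (show (0 : Int) ≤ ((m + 1 : Nat) : Int) - 1 by push_cast; omega),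
        hcast, vget_ofNat V m hmle, h0 m (by omega), Option.bind_some]
      rw [if_pos rfl, vget_ofNat V (m + 1) hle, hc, Option.bind_some]
      rw [vset_ofNat V m (c + 1) hmle]
      have hmlt : m < V.size := by omega
      rw [ih f (V.setIfInBounds m (c + 1)) (c + 1) k hmle (by omega)
        (by rw [Array.size_setIfInBounds, hsz])
        (by rw [Array.getElem?_setIfInBounds, if_pos rfl, if_pos hmlt, Option.getD_some])
        (fun j hj => by
            have hj0 := h0 j (by omega)
            have hmj : ¬ (m = j) := by omega
            rw [Array.getElem?_setIfInBounds, if_neg hmj]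
            exact hj0)]
      push_cast at hk
      push_cast
      split_ifs
      all_goals first | rfl | (exfalso; omega) | (congr 1; omega)

lemma bfs_nonneg (n : Nat) (k : Int) (hn : n ≤ 100000) :
    bfs (n : Int) k = bfs_alt (n : Int) k := by
  have hlt : n < 100001 := by omega
  unfold bfs
  rw [vidx_ofNat n hn, Option.bind_some]
  rw [loop_main n 300000 _ 1 k hn (by omega)
    (by rw [Array.size_setIfInBounds, Array.size_replicate])
    (by rw [Array.getElem?_setIfInBounds, if_pos rfl, Array.size_replicate, if_pos hlt,
          Option.getD_some])
    (fun j hj => by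
        have hne : ¬ (n = j) := by omega
        rw [Array.getElem?_setIfInBounds, if_neg hne, Array.getElem?_replicate,
          if_pos (show j < 100001 by omega), Option.getD_some])]
  unfold bfs_alt
  split_ifs
  all_goals first | rfl | (exfalso; omega) | (congr 1; omega)

-- ===== VERDICT (by name: the statement is the Claim_ definition above) =====
theorem bfs_spec : Claim_equal_bfs := by
  intro x k _ hpre
  obtain ⟨h1, h2⟩ := hpre
  show bfs x k = bfs_alt x k
  by_cases hx : 0 ≤ x
  · obtain ⟨n, rfl⟩ : ∃ n : Nat, x = (n : Int) := ⟨x.toNat, by omega⟩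
    exact bfs_nonneg n k (by omega)
  · have hjlt : (x + 100001).toNat < 100001 := by omega
    have hvidx : vidx x = some (x + 100001).toNat := by
      unfold vidx
      rw [if_neg (by omega), if_pos (by omega)]
    unfold bfs
    rw [hvidx, Option.bind_some]
    rw [show (300000 : Nat) = 299999 + 1 from rfl, bfsLoop_one]
    by_cases hk : x = k
    · rw [if_pos hk, ← hk]
      have hv1 : vget ((Array.replicate 100001 (0 : Int)).setIfInBounds (x + 100001).toNat 1) x
          = some 1 := by
        unfold vget
        rw [hvidx, Option.map_some]
        rw [Array.getElem?_setIfInBounds, if_pos rfl, Array.size_replicate, if_pos hjlt,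
          Option.getD_some]
      rw [hv1, Option.map_some]
      unfold bfs_alt
      rw [if_pos rfl]
      norm_num
    · rw [if_neg hk, if_neg (show ¬ ((0 : Int) ≤ x - 1) by omega),
        show (299999 : Nat) = 299998 + 1 from rfl, bfsLoop_nil]
      unfold bfs_alt
      rw [if_neg hk, if_neg (show ¬ (0 ≤ k ∧ k < x) by omega)]
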